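-- pv_equiv track=rewrite | github.com/pypi-data/pypi-mirror-215 | packages/miacag/miacag-0.0.83.tar.gz/miacag-0.0.83/miacag/models/modules.py | getCountsLoss
-- ===== SOURCE A (Python) =====
-- def getCountsLoss(losses):
--     count_regression = 0
--     count_classification = 0
--     for loss_u in losses:
--         if loss_u in ['CE']:
--             count_classification += 1
--         elif loss_u in ['MSE', '_L1', 'L1smooth']:
--             count_regression += 1
--         else:
--             raise ValueError('this loss is not implementeed:', loss_u)
--     return count_regression, count_classification
-- ===== SOURCE B (Python) =====
-- CLASSIFICATION = ['CE']
-- REGRESSION = ['MSE', '_L1', 'L1smooth']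
--
--
-- def getCountsLoss(losses):
--     # validation pass: fail fast on the first unknown loss
--     for loss_u in losses:
--         if loss_u not in CLASSIFICATION and loss_u not in REGRESSION:
--             raise ValueError('this loss is not implementeed:', loss_u)
--     count_classification = sum(1 for l in losses if l in CLASSIFICATION)
--     count_regression = sum(1 for l in losses if l in REGRESSION)
--     return count_regression, count_classification
-- ===== Notes on version B (the rewrite author's own statement) =====
-- stated objective: idiomatic
-- what changed: Replaced the single accumulator loop by a validation pass followed by two membership-count comprehensions over fixed category lists.
import Mathlib
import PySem

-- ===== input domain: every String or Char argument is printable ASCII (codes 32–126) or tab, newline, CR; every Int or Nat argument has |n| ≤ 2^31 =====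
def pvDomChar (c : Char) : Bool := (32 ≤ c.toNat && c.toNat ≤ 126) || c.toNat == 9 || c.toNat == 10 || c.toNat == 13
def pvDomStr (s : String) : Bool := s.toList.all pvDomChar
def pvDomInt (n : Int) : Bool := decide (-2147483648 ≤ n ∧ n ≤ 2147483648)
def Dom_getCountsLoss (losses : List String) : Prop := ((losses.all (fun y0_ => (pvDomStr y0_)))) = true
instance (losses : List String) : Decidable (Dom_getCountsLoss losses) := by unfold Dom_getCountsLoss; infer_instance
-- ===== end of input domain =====

-- B changes the decomposition: one validation pass, then two membership-count passes (no speed claim).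

-- ===== PORT A =====
-- A's loop: one pass with two accumulators; the unknown-loss branch raises ValueError
-- (excluded by Pre_; the recursion returns the current counts there, which the claim never reaches).
def getCountsLossGo : List String → Int → Int → Int × Int
  | [], r, c => (r, c)
  | l :: ls, r, c =>
    if l ∈ ["CE"] then getCountsLossGo ls r (c + 1)
    else if l ∈ ["MSE", "_L1", "L1smooth"] then getCountsLossGo ls (r + 1) c
    else (r, c)

def getCountsLoss (losses : List String) : Int × Int :=
  getCountsLossGo losses 0 0

-- ===== PORT B =====
-- B: validation pass (vacuous under Pre_, kept as B's all-known check), then two counts.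
def getCountsLoss_alt (losses : List String) : Int × Int :=
  if losses.all (fun l => l ∈ ["CE"] || l ∈ ["MSE", "_L1", "L1smooth"]) then
    ((losses.countP (fun l => l ∈ ["MSE", "_L1", "L1smooth"]) : Int),
     (losses.countP (fun l => l ∈ ["CE"]) : Int))
  else (0, 0)  -- unreachable: B raises here, outside Pre_

-- ===== PRECONDITION & SPEC =====
-- Pre_ excludes exactly the inputs on which A raises ValueError: a loss not among the four known names.
def Pre_getCountsLoss (losses : List String) : Prop :=
  ∀ l ∈ losses, l = "CE" ∨ l = "MSE" ∨ l = "_L1" ∨ l = "L1smooth"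
instance (losses : List String) : Decidable (Pre_getCountsLoss losses) := by
  unfold Pre_getCountsLoss; infer_instance

def pvWitness_getCountsLoss : List String := ["MSE", "CE", "_L1", "L1smooth", "CE"]

def Spec_getCountsLoss (losses : List String) (out : Int × Int) : Prop := out = getCountsLoss_alt losses
instance (losses : List String) (out : Int × Int) : Decidable (Spec_getCountsLoss losses out) := by unfold Spec_getCountsLoss; infer_instance

-- ===== CLAIM (what is proved, stated in full; the proofs are below) =====
def Claim_equal_getCountsLoss : Prop := ∀ (losses : List String), Dom_getCountsLoss losses → Pre_getCountsLoss losses → Spec_getCountsLoss losses (getCountsLoss losses)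

-- ===== LEMMAS AND PROOFS =====
theorem getCountsLossGo_eq (losses : List String) (r c : Int)
    (h : Pre_getCountsLoss losses) :
    getCountsLossGo losses r c =
      (r + (losses.countP (fun l => l ∈ ["MSE", "_L1", "L1smooth"]) : Int),
       c + (losses.countP (fun l => l ∈ ["CE"]) : Int)) := by
  induction losses generalizing r c with
  | nil => simp [getCountsLossGo]
  | cons l ls ih =>
    have hl := h l (List.mem_cons_self ..)
    have hls : Pre_getCountsLoss ls := fun x hx => h x (List.mem_cons_of_mem _ hx)
    rcases hl with h1 | h1 | h1 | h1 <;>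
      simp [getCountsLossGo, h1, ih _ _ hls, List.countP_cons] <;> ring

theorem getCountsLoss_spec_aux (losses : List String)
    (h : Pre_getCountsLoss losses) :
    getCountsLoss losses = getCountsLoss_alt losses := by
  have hall : losses.all (fun l => l ∈ ["CE"] || l ∈ ["MSE", "_L1", "L1smooth"]) = true := by
    simp only [List.all_eq_true]
    intro l hl
    rcases h l hl with h1 | h1 | h1 | h1 <;> simp [h1]
  simp only [getCountsLoss, getCountsLoss_alt]
  rw [if_pos hall, getCountsLossGo_eq losses 0 0 h]
  simp

-- ===== VERDICT (by name: the statement is the Claim_ definition above) =====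
theorem getCountsLoss_spec : Claim_equal_getCountsLoss := by
  intro losses _ hpre
  exact getCountsLoss_spec_aux losses hpre
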